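-- pv_equiv track=rewrite | github.com/JanMetz/Cryptography | BSS Generator/bss.py | longSeriesTest
-- ===== SOURCE A (Python) =====
-- def longSeriesTest(row):
--     length = 0
--     for elem in row:
--         if elem == 1:
--             length += 1
--         else:
--             if length >= 26:
--                 return 'Failed'
--
--             length = 0
--
--     return 'Passed'
-- ===== SOURCE B (Python) =====
-- def longSeriesTest(row):
--     # positions of the non-one elements; gaps between consecutive ones give run lengths
--     edges = [-1] + [i for i, x in enumerate(row) if x != 1] + [len(row)]
--     return 'Failed' if any(b - a >= 27 for a, b in zip(edges, edges[1:])) else 'Passed'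
-- ===== Notes on version B (the rewrite author's own statement) =====
-- stated objective: alternative
-- what changed: B replaces A's streaming counter-and-reset loop by index arithmetic: it collects the positions of the non-one elements and checks the gap between consecutive edge positions (run length = gap - 1), which also tests the trailing run A never checks.
-- intended difference: On rows whose last 26 elements are all 1 and which contain no run of 26 ones followed by a non-one, A returns 'Passed' because its >=26 check only fires when a non-one is seen (the trailing run is never tested), while B returns 'Failed', the intended verdict of a long-series test. — e.g. on longSeriesTest([1, 1, 1, 1, 1, 1, 1, 1, 1, 1, 1, 1, 1, 1, 1, 1, 1, 1, 1, 1, 1, 1, 1, 1, 1, 1]): A returns "Passed", B returns "Failed"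
import Mathlib
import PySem

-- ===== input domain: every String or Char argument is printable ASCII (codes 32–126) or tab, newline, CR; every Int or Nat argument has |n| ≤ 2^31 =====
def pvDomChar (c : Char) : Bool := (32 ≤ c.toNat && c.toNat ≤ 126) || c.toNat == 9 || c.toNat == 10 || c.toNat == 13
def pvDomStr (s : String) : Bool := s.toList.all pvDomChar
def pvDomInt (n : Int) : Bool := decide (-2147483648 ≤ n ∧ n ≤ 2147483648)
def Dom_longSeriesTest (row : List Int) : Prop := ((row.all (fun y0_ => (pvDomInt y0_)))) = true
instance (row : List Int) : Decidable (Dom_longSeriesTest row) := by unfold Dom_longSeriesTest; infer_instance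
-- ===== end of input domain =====

-- B finds runs of ones via the positions of the non-one elements (gap arithmetic) instead of A's
-- streaming counter; B also tests the trailing run, which A never checks (see D_ below).

-- ===== PORT A =====
def longSeriesTestGo : List Int → Int → String
  | [], _ => "Passed"
  | e :: rest, length =>
    if e = 1 then longSeriesTestGo rest (length + 1)
    else if 26 ≤ length then "Failed"
    else longSeriesTestGo rest 0

def longSeriesTest (row : List Int) : String := longSeriesTestGo row 0

-- ===== PORT B =====
def longSeriesTest_alt (row : List Int) : String :=
  let breaks : List Int :=
    (PySem.List.enumerate row).filterMap (fun p => if p.2 ≠ 1 then some p.1 else none)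
  let edges : List Int := [-1] ++ breaks ++ [(row.length : Int)]
  if (edges.zip edges.tail).any (fun p => decide (27 ≤ p.2 - p.1)) then "Failed" else "Passed"

-- ===== PRECONDITION & SPEC =====
-- Bnd row: some run of 26 ones is followed by a non-one element (a "bounded" long run).
def Bnd (row : List Int) : Prop :=
  ∃ i < row.length, i + 26 < row.length ∧ (∀ j < 26, row.getD (i + j) 0 = 1) ∧
    row.getD (i + 26) 0 ≠ 1

-- Trail row: the last 26 elements all equal 1 (a long run ending the row).
def Trail (row : List Int) : Prop :=
  26 ≤ row.length ∧ ∀ j < row.length, row.length ≤ j + 26 → row.getD j 0 = 1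

-- On rows whose last 26 elements are all 1 and which contain no run of 26 ones followed by a
-- non-one, A returns 'Passed' (its >= 26 check only fires when a non-one is seen, so the
-- trailing run is never tested) while B returns 'Failed', the intended verdict of the test.
def D_longSeriesTest (row : List Int) : Prop := Trail row ∧ ¬ Bnd row

instance (row : List Int) : Decidable (D_longSeriesTest row) := by
  unfold D_longSeriesTest Trail Bnd; infer_instance

def Spec_longSeriesTest (row : List Int) (out : String) : Prop :=
  ¬ D_longSeriesTest row → out = longSeriesTest_alt row
instance (row : List Int) (out : String) : Decidable (Spec_longSeriesTest row out) := by
  unfold Spec_longSeriesTest; infer_instance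

def pvDiffWitness_longSeriesTest : List Int :=
  [1, 1, 1, 1, 1, 1, 1, 1, 1, 1, 1, 1, 1, 1, 1, 1, 1, 1, 1, 1, 1, 1, 1, 1, 1, 1]

def pvDiffWitnessOut_longSeriesTest : String × String := ("Passed", "Failed")

-- ===== CLAIM (what is proved, stated in full; the proofs are below) =====
def Claim_unchanged_longSeriesTest : Prop :=
  ∀ (row : List Int), Dom_longSeriesTest row → Spec_longSeriesTest row (longSeriesTest row)
def Claim_changed_longSeriesTest : Prop :=
  Dom_longSeriesTest (pvDiffWitness_longSeriesTest) ∧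
  D_longSeriesTest (pvDiffWitness_longSeriesTest) ∧
  longSeriesTest (pvDiffWitness_longSeriesTest) = pvDiffWitnessOut_longSeriesTest.1 ∧
  longSeriesTest_alt (pvDiffWitness_longSeriesTest) = pvDiffWitnessOut_longSeriesTest.2 ∧
  pvDiffWitnessOut_longSeriesTest.1 ≠ pvDiffWitnessOut_longSeriesTest.2
def Claim_exact_longSeriesTest : Prop :=
  ∀ (row : List Int), Dom_longSeriesTest row → D_longSeriesTest row →
    longSeriesTest row ≠ longSeriesTest_alt row

-- ===== LEMMAS AND PROOFS =====

-- Reference single-pass check: like A's loop but also testing the final run.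
def chk : List Int → Int → Bool
  | [], c => decide (26 ≤ c)
  | x :: xs, c => if x = 1 then chk xs (c + 1) else (decide (26 ≤ c) || chk xs 0)

-- Chain form of B's zip-adjacent any.
def gapGo : Int → List Int → Int → Bool
  | p, [], last => decide (27 ≤ last - p)
  | p, b :: bs, last => decide (27 ≤ b - p) || gapGo b bs last

lemma zip_any_eq_gapGo (p : Int) (bs : List Int) (last : Int) :
    (((p :: (bs ++ [last])).zip (bs ++ [last])).any (fun q => decide (27 ≤ q.2 - q.1)))
      = gapGo p bs last := by
  induction bs generalizing p with
  | nil => simp [gapGo]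
  | cons b bs ih => simp [gapGo, ← ih b]

lemma gapGo_nb (row : List Int) : ∀ (s prev : Int), prev < s →
    gapGo prev
      ((PySem.List.enumerate row s).filterMap (fun p => if p.2 ≠ 1 then some p.1 else none))
      (s + row.length)
      = chk row (s - prev - 1) := by
  induction row with
  | nil =>
    intro s prev _
    simp only [PySem.List.enumerate_nil, List.filterMap_nil, gapGo, chk,
      List.length_nil, Int.natCast_zero, add_zero]
    rw [decide_eq_decide]; omega
  | cons x xs ih =>
    intro s prev hps
    rw [PySem.List.enumerate_cons]
    by_cases hx : x = 1
    · subst hx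
      rw [List.filterMap_cons_none (by simp)]
      rw [show s + ((((1:Int) :: xs).length : Nat) : Int) = (s + 1) + (xs.length : Int) by
        push_cast [List.length_cons]; ring]
      rw [ih (s + 1) prev (by omega)]
      simp only [chk]
      congr 1
      ring
    · rw [show (List.filterMap (fun p => if p.2 ≠ 1 then some p.1 else none)
          ((s, x) :: PySem.List.enumerate xs (s + 1)))
          = s :: (PySem.List.enumerate xs (s + 1)).filterMap
              (fun p => if p.2 ≠ 1 then some p.1 else none) by
        simp [hx]]
      simp only [gapGo]
      rw [show s + (((x :: xs).length : Nat) : Int) = (s + 1) + (xs.length : Int) by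
        push_cast [List.length_cons]; ring]
      rw [ih (s + 1) s (by omega)]
      rw [show (s + 1) - s - 1 = (0 : Int) by ring]
      simp only [chk, if_neg hx]
      congr 1
      rw [decide_eq_decide]; omega

lemma alt_eq_chk (row : List Int) :
    longSeriesTest_alt row = if chk row 0 = true then "Failed" else "Passed" := by
  have h := gapGo_nb row 0 (-1) (by omega)
  rw [show (0 : Int) - (-1) - 1 = 0 by ring] at h
  rw [show (0 : Int) + (row.length : Int) = (row.length : Int) by ring] at h
  unfold longSeriesTest_alt
  simp only [List.cons_append, List.nil_append, List.tail_cons,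
    zip_any_eq_gapGo, h]

-- getD facts for replicate-prefixed lists
lemma getD_repl (c : Nat) (j : Nat) (h : j < c) :
    (List.replicate c (1 : Int)).getD j 0 = 1 := by
  simp [List.getD_eq_getElem?_getD, h]

lemma getD_repl_append (c : Nat) (row : List Int) (j : Nat) (h : j < c) :
    (List.replicate c (1 : Int) ++ row).getD j 0 = 1 := by
  rw [List.getD_append _ _ _ _ (by simpa using h)]
  exact getD_repl c j h

lemma getD_repl_append_right (c : Nat) (row : List Int) (j : Nat) (h : c ≤ j) :
    (List.replicate c (1 : Int) ++ row).getD j 0 = row.getD (j - c) 0 := by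
  rw [List.getD_append_right _ _ _ _ (by simpa using h)]
  simp

lemma not_bnd_replicate (c : Nat) : ¬ Bnd (List.replicate c (1 : Int)) := by
  rintro ⟨i, hi, h26, hones, hne⟩
  rw [List.length_replicate] at h26
  exact hne (getD_repl c (i + 26) h26)

lemma bnd_hit (c : Nat) (hc : 26 ≤ c) (x : Int) (hx : x ≠ 1) (xs : List Int) :
    Bnd (List.replicate c 1 ++ x :: xs) := by
  have hlen : (List.replicate c (1 : Int) ++ x :: xs).length = c + (xs.length + 1) := by simp
  refine ⟨c - 26, by omega, by omega, ?_, ?_⟩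
  · intro j hj
    exact getD_repl_append c (x :: xs) (c - 26 + j) (by omega)
  · rw [show c - 26 + 26 = c by omega, getD_repl_append_right c (x :: xs) c le_rfl]
    simpa using hx

lemma bnd_shift (c : Nat) (hc : c < 26) (x : Int) (hx : x ≠ 1) (xs : List Int) :
    Bnd (List.replicate c 1 ++ x :: xs) ↔ Bnd xs := by
  have hlen : (List.replicate c (1 : Int) ++ x :: xs).length = c + (xs.length + 1) := by simp
  constructor
  · rintro ⟨i, hi, h26, hones, hne⟩
    rw [hlen] at hi h26
    have hci : c + 1 ≤ i := by
      by_contra hlt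
      have hj : c - i < 26 := by omega
      have := hones (c - i) hj
      rw [show i + (c - i) = c by omega, getD_repl_append_right c (x :: xs) c le_rfl] at this
      simp at this
      exact hx this
    refine ⟨i - (c + 1), by omega, by omega, ?_, ?_⟩
    · intro j hj
      have := hones j hj
      rw [getD_repl_append_right c (x :: xs) (i + j) (by omega)] at this
      rw [show i + j - c = (i - (c + 1) + j) + 1 by omega] at this
      simpa using this
    · rw [getD_repl_append_right c (x :: xs) (i + 26) (by omega)] at hne
      rw [show i + 26 - c = (i - (c + 1) + 26) + 1 by omega] at hne
      simpa using hne
  · rintro ⟨i, hi, h26, hones, hne⟩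
    refine ⟨i + c + 1, by rw [hlen]; omega, by rw [hlen]; omega, ?_, ?_⟩
    · intro j hj
      rw [getD_repl_append_right c (x :: xs) (i + c + 1 + j) (by omega)]
      rw [show i + c + 1 + j - c = (i + j) + 1 by omega]
      simpa using hones j hj
    · rw [getD_repl_append_right c (x :: xs) (i + c + 1 + 26) (by omega)]
      rw [show i + c + 1 + 26 - c = (i + 26) + 1 by omega]
      simpa using hne

lemma trail_replicate (c : Nat) : Trail (List.replicate c (1 : Int)) ↔ 26 ≤ c := by
  constructor
  · rintro ⟨hlen, _⟩; simpa using hlen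
  · intro hc
    refine ⟨by simpa using hc, fun j hj _ => ?_⟩
    exact getD_repl c j (by simpa using hj)

lemma trail_shift (u : List Int) (x : Int) (hx : x ≠ 1) (xs : List Int) :
    Trail (u ++ x :: xs) ↔ Trail xs := by
  have hlen : (u ++ x :: xs).length = u.length + (xs.length + 1) := by simp
  constructor
  · rintro ⟨h26, h⟩
    rw [hlen] at h26 h
    have hxs : 26 ≤ xs.length := by
      by_contra hlt
      have := h u.length (by omega) (by omega)
      rw [List.getD_append_right _ _ _ _ le_rfl] at this
      simp at this
      exact hx this
    refine ⟨hxs, fun j hj hge => ?_⟩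
    have := h (u.length + 1 + j) (by omega) (by omega)
    rw [List.getD_append_right _ _ _ _ (by omega)] at this
    rw [show u.length + 1 + j - u.length = j + 1 by omega] at this
    simpa using this
  · rintro ⟨h26, h⟩
    refine ⟨by rw [hlen]; omega, fun j hj hge => ?_⟩
    rw [hlen] at hj hge
    rw [List.getD_append_right _ _ _ _ (by omega)]
    rw [show j - u.length = (j - u.length - 1) + 1 by omega]
    simp only [List.getD_cons_succ]
    exact h (j - u.length - 1) (by omega) (by omega)

lemma go_eq (row : List Int) : ∀ (c : Nat),
    (longSeriesTestGo row (c : Int) = "Failed") ↔ Bnd (List.replicate c 1 ++ row) := by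
  induction row with
  | nil =>
    intro c
    simp only [longSeriesTestGo, List.append_nil]
    constructor
    · intro h; exact absurd h (by decide)
    · intro h; exact absurd h (not_bnd_replicate c)
  | cons x xs ih =>
    intro c
    by_cases hx : x = 1
    · rw [show (List.replicate c (1:Int) ++ x :: xs) = List.replicate (c + 1) 1 ++ xs by
        rw [List.replicate_succ']; simp [hx]]
      rw [show longSeriesTestGo (x :: xs) (c : Int) = longSeriesTestGo xs ((c : Int) + 1) by
        simp [longSeriesTestGo, hx]]
      rw [show ((c : Int) + 1) = ((c + 1 : Nat) : Int) by push_cast; ring]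
      exact ih (c + 1)
    · by_cases hc : 26 ≤ c
      · rw [show longSeriesTestGo (x :: xs) (c : Int) = "Failed" by
          simp [longSeriesTestGo, hx]; omega]
        simp only [true_iff]
        exact bnd_hit c hc x hx xs
      · rw [show longSeriesTestGo (x :: xs) (c : Int) = longSeriesTestGo xs ((0 : Nat) : Int) by
          simp [longSeriesTestGo, hx]; omega]
        rw [ih 0, bnd_shift c (by omega) x hx xs]
        simp

lemma chk_iff (row : List Int) : ∀ (c : Nat),
    chk row (c : Int) = true ↔
      (Bnd (List.replicate c 1 ++ row) ∨ Trail (List.replicate c 1 ++ row)) := by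
  induction row with
  | nil =>
    intro c
    simp only [chk, List.append_nil, decide_eq_true_eq]
    rw [trail_replicate c]
    constructor
    · intro h; right; omega
    · rintro (h | h)
      · exact absurd h (not_bnd_replicate c)
      · omega
  | cons x xs ih =>
    intro c
    by_cases hx : x = 1
    · rw [show (List.replicate c (1:Int) ++ x :: xs) = List.replicate (c + 1) 1 ++ xs by
        rw [List.replicate_succ']; simp [hx]]
      rw [show chk (x :: xs) (c : Int) = chk xs ((c : Int) + 1) by simp [chk, hx]]
      rw [show ((c : Int) + 1) = ((c + 1 : Nat) : Int) by push_cast; ring]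
      exact ih (c + 1)
    · rw [show chk (x :: xs) (c : Int) = (decide (26 ≤ (c : Int)) || chk xs 0) by
        simp [chk, hx]]
      by_cases hc : 26 ≤ c
      · simp only [Bool.or_eq_true, decide_eq_true_eq]
        constructor
        · intro _; left; exact bnd_hit c hc x hx xs
        · intro _; left; omega
      · rw [show (decide (26 ≤ (c : Int)) || chk xs 0) = chk xs ((0 : Nat) : Int) by
          simp; omega]
        rw [ih 0, bnd_shift c (by omega) x hx xs,
          trail_shift (List.replicate c 1) x hx xs]
        simp

lemma go_total (row : List Int) : ∀ (c : Int),
    longSeriesTestGo row c = "Passed" ∨ longSeriesTestGo row c = "Failed" := by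
  induction row with
  | nil => intro c; left; rfl
  | cons x xs ih =>
    intro c
    by_cases hx : x = 1
    · simpa [longSeriesTestGo, hx] using ih (c + 1)
    · by_cases hc : 26 ≤ c
      · right; simp [longSeriesTestGo, hx, hc]
      · simpa [longSeriesTestGo, hx, hc] using ih 0

lemma a_eq_failed_iff (row : List Int) : longSeriesTest row = "Failed" ↔ Bnd row := by
  have := go_eq row 0
  simpa [longSeriesTest] using this

lemma chk_zero_iff (row : List Int) : chk row 0 = true ↔ (Bnd row ∨ Trail row) := by
  have h := chk_iff row 0
  simpa using h

lemma alt_failed (row : List Int) (h : Bnd row ∨ Trail row) :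
    longSeriesTest_alt row = "Failed" := by
  rw [alt_eq_chk row, if_pos ((chk_zero_iff row).mpr h)]

lemma alt_passed (row : List Int) (h : ¬ (Bnd row ∨ Trail row)) :
    longSeriesTest_alt row = "Passed" := by
  rw [alt_eq_chk row, if_neg (fun hc => h ((chk_zero_iff row).mp hc))]

-- ===== VERDICT (by name: the statement is the Claim_ definition above) =====
theorem longSeriesTest_spec : Claim_unchanged_longSeriesTest := by
  intro row _
  unfold Spec_longSeriesTest
  intro hnD
  by_cases hB : Bnd row
  · rw [(a_eq_failed_iff row).mpr hB, alt_failed row (Or.inl hB)]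
  · have hT : ¬ Trail row := fun hT => hnD ⟨hT, hB⟩
    have hA : longSeriesTest row = "Passed" := by
      rcases go_total row 0 with h | h
      · exact h
      · exact absurd ((a_eq_failed_iff row).mp h) hB
    rw [hA, alt_passed row (by tauto)]

theorem longSeriesTest_changed : Claim_changed_longSeriesTest := by
  unfold Claim_changed_longSeriesTest; decide

theorem longSeriesTest_tight : Claim_exact_longSeriesTest := by
  intro row _ hD
  obtain ⟨hT, hB⟩ := hD
  have hA : longSeriesTest row = "Passed" := by
    rcases go_total row 0 with h | h
    · exact h
    · exact absurd ((a_eq_failed_iff row).mp h) hB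
  rw [hA, alt_failed row (Or.inr hT)]
  decide
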